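-- pv_equiv track=rewrite | github.com/Danial-Changez/VCard | bin/A3main.py | parseCardDetails
-- ===== SOURCE A (Python) =====
-- def formatDateString(date_str):
--     """
--     Convert 'YYYYMMDD' -> 'YYYY/MM/DD' if length=8 and numeric.
--     Otherwise return raw date_str.
--     """
--     if len(date_str) == 8 and date_str.isdigit():
--         return date_str[0:4] + "/" + date_str[4:6] + "/" + date_str[6:8]
--     return date_str
--
-- def formatTimeString(time_str):
--     """
--     Convert 'HHMMSS' -> 'HH:MM:SS' if length=6 and numeric.
--     Otherwise return raw time_str.
--     """
--     if len(time_str) == 6 and time_str.isdigit():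
--         return time_str[0:2] + ":" + time_str[2:4] + ":" + time_str[4:6]
--     return time_str
--
-- def parseDateTime(dt_str):
--     """
--     Convert a vCard date-time string (like '20090808T143000Z') into a nicer display:
--       - '20090808T143000Z' -> 'Date: 2009/08/08 Time: 14:30:00 (UTC)'
--       - '20090808T143000'  -> 'Date: 2009/08/08 Time: 14:30:00'
--       - '20090808'         -> 'Date: 2009/08/08'
--       - 'circa 1960'       -> 'circa 1960' (treated as text)
--     """
--     dt_str = dt_str.strip()
--     if not dt_str:
--         return ""
--
--     # Check for trailing Z => UTC
--     is_utc = False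
--     if dt_str.endswith("Z"):
--         is_utc = True
--         dt_str = dt_str[:-1]  # remove trailing 'Z'
--
--     # Split on 'T' to separate date/time
--     if "T" in dt_str:
--         parts = dt_str.split("T", 1)
--         date_part = formatDateString(parts[0])
--         time_part = formatTimeString(parts[1])
--         result = f"Date: {date_part} Time: {time_part}"
--         if is_utc:
--             result += " (UTC)"
--         return result
--     else:
--         # no 'T'
--         # check if it's 8-digit date
--         if dt_str.isdigit() and len(dt_str) == 8:
--             return f"Date: {formatDateString(dt_str)}"
--         else:
--             # text
--             return dt_str
--
-- def parseCardDetails(card_str):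
--     """
--     Extract BDAY and ANNIVERSARY lines from card_str, returning nicely formatted strings.
--     """
--     bdayVal = ""
--     annivVal = ""
--     for line in card_str.splitlines():
--         line = line.strip()
--         if line.startswith("BDAY:"):
--             raw = line[5:].strip()
--             bdayVal = parseDateTime(raw)
--         elif line.startswith("ANNIVERSARY:"):
--             raw = line[12:].strip()
--             annivVal = parseDateTime(raw)
--     return (bdayVal, annivVal)
-- ===== SOURCE B (Python) =====
-- def _fmtFixed(s, widths, sep):
--     # Generic fixed-width digit grouper: 'YYYYMMDD'->'YYYY/MM/DD', 'HHMMSS'->'HH:MM:SS'.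
--     if len(s) == sum(widths) and s.isdigit():
--         parts, i = [], 0
--         for w in widths:
--             parts.append(s[i:i + w])
--             i += w
--         return sep.join(parts)
--     return s
--
-- def _parseDT(dt_str):
--     dt_str = dt_str.strip()
--     if not dt_str:
--         return ""
--     is_utc = dt_str.endswith("Z")
--     core = dt_str[:-1] if is_utc else dt_str
--     if "T" in core:
--         date_part, time_part = core.split("T", 1)
--         out = "Date: " + _fmtFixed(date_part, (4, 2, 2), "/") + " Time: " + _fmtFixed(time_part, (2, 2, 2), ":")
--         return out + " (UTC)" if is_utc else out
--     if len(core) == 8 and core.isdigit():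
--         return "Date: " + _fmtFixed(core, (4, 2, 2), "/")
--     return core
--
-- def _lastField(lines, prefix):
--     # Scan the lines back to front; the first hit is the last occurrence.
--     for line in reversed(lines):
--         line = line.strip()
--         if line.startswith(prefix):
--             return _parseDT(line[len(prefix):].strip())
--     return ""
--
-- def parseCardDetails(card_str):
--     lines = card_str.splitlines()
--     return (_lastField(lines, "BDAY:"), _lastField(lines, "ANNIVERSARY:"))
-- ===== Notes on version B (the rewrite author's own statement) =====
-- stated objective: alternative
-- what changed: parseCardDetails no longer keeps two accumulators in one forward pass; it scans the lines back to front once per field, returning the first (i.e. last overall) matching line, and the two bespoke date/time formatters are merged into one generic fixed-width digit grouper driven by a widths tuple.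
import Mathlib
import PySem

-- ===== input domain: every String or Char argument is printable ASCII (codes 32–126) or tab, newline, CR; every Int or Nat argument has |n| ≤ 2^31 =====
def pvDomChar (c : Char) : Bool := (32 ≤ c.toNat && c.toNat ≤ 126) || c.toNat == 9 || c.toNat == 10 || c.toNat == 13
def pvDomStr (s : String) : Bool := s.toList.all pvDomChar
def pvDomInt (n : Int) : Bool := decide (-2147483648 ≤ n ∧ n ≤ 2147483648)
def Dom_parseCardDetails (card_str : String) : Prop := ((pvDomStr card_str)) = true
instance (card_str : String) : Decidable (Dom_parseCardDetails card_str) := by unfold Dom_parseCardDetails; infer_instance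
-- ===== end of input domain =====

-- B replaces A's forward accumulator pass (one branch per field inside the loop) by two
-- back-to-front first-match scans, one per field, and folds the two bespoke date/time
-- formatters into one generic fixed-width grouper; same results, same cost (objective: alternative).

-- ===== PORT A =====
-- A's helpers, ported on List Char

def fmtDateC (s : List Char) : List Char :=
  if decide (s.length = 8) && PySem.Chars.strIsdigit s then
    PySem.Chars.slice s (some 0) (some 4) ++ ['/'] ++ PySem.Chars.slice s (some 4) (some 6)
      ++ ['/'] ++ PySem.Chars.slice s (some 6) (some 8)
  else s

def fmtTimeC (s : List Char) : List Char :=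
  if decide (s.length = 6) && PySem.Chars.strIsdigit s then
    PySem.Chars.slice s (some 0) (some 2) ++ [':'] ++ PySem.Chars.slice s (some 2) (some 4)
      ++ [':'] ++ PySem.Chars.slice s (some 4) (some 6)
  else s

def parseDateTimeC (dt0 : List Char) : List Char :=
  let dt := PySem.Chars.strip dt0
  if dt = [] then []
  else
    let p := if PySem.Chars.endswith dt ['Z'] then (true, PySem.Chars.slice dt none (some (-1)))
             else (false, dt)
    let isUtc := p.1
    let dt := p.2
    if PySem.Chars.isIn ['T'] dt then
      let parts := PySem.Chars.splitOnMax dt ['T'] 1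
      -- parts[0] / parts[1]: always present here since 'T' ∈ dt, so the defaults are unreachable
      let datePart := fmtDateC (PySem.List.pyGetD parts 0 [])
      let timePart := fmtTimeC (PySem.List.pyGetD parts 1 [])
      let result := "Date: ".toList ++ datePart ++ " Time: ".toList ++ timePart
      if isUtc then result ++ " (UTC)".toList else result
    else
      if PySem.Chars.strIsdigit dt && decide (dt.length = 8) then "Date: ".toList ++ fmtDateC dt
      else dt

-- A's loop body: test each stripped line against the two prefixes, overwrite the matching slot
def pvStepA (st : List Char × List Char) (line : List Char) : List Char × List Char :=
  let l := PySem.Chars.strip line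
  if PySem.Chars.startswith l "BDAY:".toList then
    (parseDateTimeC (PySem.Chars.strip (PySem.Chars.slice l (some 5) none)), st.2)
  else if PySem.Chars.startswith l "ANNIVERSARY:".toList then
    (st.1, parseDateTimeC (PySem.Chars.strip (PySem.Chars.slice l (some 12) none)))
  else st

def parseCardDetails (card_str : String) : String × String :=
  let r := (PySem.Chars.splitlines card_str.toList).foldl pvStepA ([], [])
  (String.ofList r.1, String.ofList r.2)

-- ===== PORT B =====
-- _fmtFixed: generic fixed-width digit grouper (loop over the widths, slicing at a running index)
def pvFmtFixed (s : List Char) (widths : List Int) (sep : List Char) : List Char :=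
  if decide ((s.length : Int) = widths.sum) && PySem.Chars.strIsdigit s then
    let st := widths.foldl
      (fun (st : List (List Char) × Int) w =>
        (st.1 ++ [PySem.Chars.slice s (some st.2) (some (st.2 + w))], st.2 + w)) ([], 0)
    PySem.Chars.join sep st.1
  else s

-- _parseDT
def parseDateTimeB (dt0 : List Char) : List Char :=
  let dt := PySem.Chars.strip dt0
  if dt = [] then []
  else
    let isUtc := PySem.Chars.endswith dt ['Z']
    let core := if isUtc then PySem.Chars.slice dt none (some (-1)) else dt
    if PySem.Chars.isIn ['T'] core then
      let parts := PySem.Chars.splitOnMax core ['T'] 1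
      -- the unpack 'date_part, time_part = core.split("T", 1)': both present since 'T' ∈ core
      let out := "Date: ".toList ++ pvFmtFixed (PySem.List.pyGetD parts 0 []) [4, 2, 2] ['/']
                 ++ " Time: ".toList ++ pvFmtFixed (PySem.List.pyGetD parts 1 []) [2, 2, 2] [':']
      if isUtc then out ++ " (UTC)".toList else out
    else if decide (core.length = 8) && PySem.Chars.strIsdigit core then
      "Date: ".toList ++ pvFmtFixed core [4, 2, 2] ['/']
    else core

-- _lastField's loop over reversed(lines): first match wins, '' if none
def pvScanRev (pfx : List Char) : List (List Char) → List Char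
  | [] => []
  | x :: xs =>
    let l := PySem.Chars.strip x
    if PySem.Chars.startswith l pfx then
      parseDateTimeB (PySem.Chars.strip (PySem.Chars.slice l (some (pfx.length : Int)) none))
    else pvScanRev pfx xs

def parseCardDetails_alt (card_str : String) : String × String :=
  let lines := PySem.Chars.splitlines card_str.toList
  (String.ofList (pvScanRev "BDAY:".toList lines.reverse),
   String.ofList (pvScanRev "ANNIVERSARY:".toList lines.reverse))

-- ===== PRECONDITION & SPEC =====
def Spec_parseCardDetails (card_str : String) (out : String × String) : Prop := out = parseCardDetails_alt card_str
instance (card_str : String) (out : String × String) : Decidable (Spec_parseCardDetails card_str out) := by unfold Spec_parseCardDetails; infer_instance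

-- ===== CLAIM (what is proved, stated in full; the proofs are below) =====
def Claim_equal_parseCardDetails : Prop := ∀ (card_str : String), Dom_parseCardDetails card_str → Spec_parseCardDetails card_str (parseCardDetails card_str)

-- ===== LEMMAS AND PROOFS =====

-- the raw value a single line contributes for prefix pfx, if it matches
def pvHit (pfx x : List Char) : Option (List Char) :=
  let l := PySem.Chars.strip x
  if PySem.Chars.startswith l pfx then some (PySem.Chars.strip (l.drop pfx.length)) else none

-- the value of the LAST matching line of ls (later lines win)
def pvLastMatch (pfx : List Char) : List (List Char) → Option (List Char)
  | [] => none
  | x :: xs => match pvLastMatch pfx xs with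
    | some v => some v
    | none => pvHit pfx x

-- the value of the FIRST matching line of ls
def pvFirstMatch (pfx : List Char) : List (List Char) → Option (List Char)
  | [] => none
  | x :: xs => match pvHit pfx x with
    | some v => some v
    | none => pvFirstMatch pfx xs

theorem pv_fmtFixed_date (s : List Char) : pvFmtFixed s [4, 2, 2] ['/'] = fmtDateC s := by
  unfold pvFmtFixed fmtDateC
  by_cases h : s.length = 8
  · simp only [List.foldl, List.sum_cons, List.sum_nil, h]
    norm_num
    cases hd : PySem.Chars.strIsdigit s <;>
      simp [PySem.Chars.join, List.intercalate]
  · have : ¬ ((s.length : Int) = 8) := by exact_mod_cast h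
    simp [h, this]

theorem pv_fmtFixed_time (s : List Char) : pvFmtFixed s [2, 2, 2] [':'] = fmtTimeC s := by
  unfold pvFmtFixed fmtTimeC
  by_cases h : s.length = 6
  · simp only [List.foldl, List.sum_cons, List.sum_nil, h]
    norm_num
    cases hd : PySem.Chars.strIsdigit s <;>
      simp [PySem.Chars.join, List.intercalate]
  · have : ¬ ((s.length : Int) = 6) := by exact_mod_cast h
    simp [h, this]

theorem pv_parseDT_eq (s : List Char) : parseDateTimeB s = parseDateTimeC s := by
  unfold parseDateTimeB parseDateTimeC
  by_cases h0 : PySem.Chars.strip s = []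
  · simp [h0]
  · simp only [h0]
    by_cases hz : PySem.Chars.endswith (PySem.Chars.strip s) ['Z'] = true <;>
      simp [hz, pv_fmtFixed_date, pv_fmtFixed_time, Bool.and_comm]

-- "BDAY:" and "ANNIVERSARY:" cannot both be prefixes of the same line
theorem pv_not_both (s t u : List Char)
    (hb : "BDAY:".toList ++ t = s) (ha : "ANNIVERSARY:".toList ++ u = s) : False := by
  rw [← hb] at ha
  simp at ha

-- one step of A's loop, phrased through pvHit
theorem pv_stepA (st : List Char × List Char) (x : List Char) :
    pvStepA st x =
      ((pvHit "BDAY:".toList x).elim st.1 parseDateTimeC,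
       (pvHit "ANNIVERSARY:".toList x).elim st.2 parseDateTimeC) := by
  unfold pvStepA pvHit
  by_cases hb : PySem.Chars.startswith (PySem.Chars.strip x) ['B', 'D', 'A', 'Y', ':'] = true
  · have hnA : PySem.Chars.startswith (PySem.Chars.strip x) ['A', 'N', 'N', 'I', 'V', 'E', 'R', 'S', 'A', 'R', 'Y', ':'] ≠ true := by
      intro hA
      rw [PySem.Chars.startswith_iff] at hb hA
      obtain ⟨t, ht⟩ := hb
      obtain ⟨u, hu⟩ := hA
      exact pv_not_both _ t u ht hu
    have hsl : PySem.List.slice (PySem.Chars.strip x) (some 5) none =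
        (PySem.Chars.strip x).drop 5 := by
      rw [PySem.List.slice_from _ (by norm_num)]
      rfl
    simp [hb, hnA, hsl]
  · by_cases ha : PySem.Chars.startswith (PySem.Chars.strip x) ['A', 'N', 'N', 'I', 'V', 'E', 'R', 'S', 'A', 'R', 'Y', ':'] = true
    · have hsl : PySem.List.slice (PySem.Chars.strip x) (some 12) none =
          (PySem.Chars.strip x).drop 12 := by
        rw [PySem.List.slice_from _ (by norm_num)]
        rfl
      simp [hb, ha, hsl]
    · simp [hb, ha]

-- A's fold computes the last match of each field
theorem pv_foldA (ls : List (List Char)) (b a : List Char) :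
    ls.foldl pvStepA (b, a) =
      ((pvLastMatch "BDAY:".toList ls).elim b parseDateTimeC,
       (pvLastMatch "ANNIVERSARY:".toList ls).elim a parseDateTimeC) := by
  induction ls generalizing b a with
  | nil => simp [pvLastMatch]
  | cons x xs ih =>
    simp only [List.foldl_cons, pvLastMatch, pv_stepA]
    rw [ih]
    cases pvLastMatch "BDAY:".toList xs <;> cases pvLastMatch "ANNIVERSARY:".toList xs <;>
      cases hB : pvHit "BDAY:".toList x <;> cases hA : pvHit "ANNIVERSARY:".toList x <;> simp

-- B's reversed scan computes the first match of the reversed list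
theorem pv_scanRev (pfx : List Char) (rs : List (List Char)) :
    pvScanRev pfx rs = (pvFirstMatch pfx rs).elim [] parseDateTimeB := by
  induction rs with
  | nil => simp [pvScanRev, pvFirstMatch]
  | cons x xs ih =>
    simp only [pvScanRev, pvFirstMatch, pvHit]
    by_cases h : PySem.Chars.startswith (PySem.Chars.strip x) pfx = true
    · simp [h]
    · simp [h, ih]

theorem pv_firstMatch_append (pfx : List Char) (u v : List (List Char)) :
    pvFirstMatch pfx (u ++ v) =
      match pvFirstMatch pfx u with
      | some w => some w
      | none => pvFirstMatch pfx v := by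
  induction u with
  | nil => simp [pvFirstMatch]
  | cons x xs ih =>
    simp only [List.cons_append, pvFirstMatch, ih]
    cases pvHit pfx x <;> simp

theorem pv_firstMatch_reverse (pfx : List Char) (ls : List (List Char)) :
    pvFirstMatch pfx ls.reverse = pvLastMatch pfx ls := by
  induction ls with
  | nil => rfl
  | cons x xs ih =>
    rw [List.reverse_cons, pv_firstMatch_append, ih]
    simp only [pvLastMatch, pvFirstMatch]
    cases pvLastMatch pfx xs <;> cases pvHit pfx x <;> simp

-- ===== VERDICT (by name: the statement is the Claim_ definition above) =====
theorem parseCardDetails_spec : Claim_equal_parseCardDetails := by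
  intro card_str _
  unfold Spec_parseCardDetails
  simp only [parseCardDetails, parseCardDetails_alt]
  rw [pv_foldA, pv_scanRev, pv_scanRev, pv_firstMatch_reverse, pv_firstMatch_reverse]
  cases pvLastMatch "BDAY:".toList (PySem.Chars.splitlines card_str.toList) <;>
    cases pvLastMatch "ANNIVERSARY:".toList (PySem.Chars.splitlines card_str.toList) <;>
      simp [pv_parseDT_eq]
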